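-- pv_equiv track=rewrite | github.com/rababBENFOUINA/Process-of-digital-communication | app_eel/web/codeur_enligne/codeur_enligne.py | encodeur_hdbn
-- ===== SOURCE A (Python) =====
-- def encodeur_hdbn(seq_bin , n):
--     encoded_signal = []
--     encoded_signal1 = []
--     state = 1
--     nbr_zero = 0
--     frst__V=1
--     state_v =0
--     prev_bit ='1'
--
--     for bit in seq_bin:
--         if bit == '1':
--             encoded_signal.append(state)
--             if frst__V ==1:
--                 state_v=state
--             state = - state
--             prev_bit = bit
--             nbr_zero = 1
--
--         if bit == '0' :
--             if nbr_zero == n :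
--                 frst__V = 5
--                 encoded_signal.append(state_v)
--                 state_v=-state_v
--                 nbr_zero = 0
--             else :
--                 encoded_signal.append(0)
--                 if prev_bit == '0' :
--                     nbr_zero =nbr_zero + 1
--             prev_bit = bit
--
--
--     encoded_signal_int = [int(bit) for bit in encoded_signal]
--     last_state = 0
--     nbr_zero = 0
--     prev_bit = 1
--     frst__V=1
--     for bit in encoded_signal_int:
--         if bit == 0 :
--             if prev_bit == 1  and nbr_zero == n-1  :
--                 if frst__V == 1 :
--                     encoded_signal1.append(bit)
--                     nbr_zero = 0
--                     frst__V = 5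
--                 else :
--                     encoded_signal1.append(-last_state)
--                     nbr_zero = 0
--             else :
--                 encoded_signal1.append(bit)
--
--             if prev_bit == 0 :
--                 nbr_zero = nbr_zero + 1
--
--             prev_bit = 0
--
--
--         if bit == 1 or bit  == -1 :
--             encoded_signal1.append(bit)
--             prev_bit = 1
--             last_state = bit
--
--             if nbr_zero !=  n-1 :
--                 nbr_zero = 0
--
--
--
--     return encoded_signal1
-- ===== SOURCE B (Python) =====
-- def encodeur_hdbn(seq_bin, n):
--     # Single streaming pass: each fresh symbol of the first (encoding) machine is
--     # fed straight into the second (violation) machine; no intermediate list.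
--     out = []
--     state = 1
--     nbr_zero = 0
--     frst_v = 1
--     state_v = 0
--     prev = '1'
--     last2 = 0
--     nz2 = 0
--     prev2 = 1
--     frst2 = 1
--
--     def push(sym):
--         nonlocal last2, nz2, prev2, frst2
--         if sym == 0:
--             if prev2 == 1 and nz2 == n - 1:
--                 if frst2 == 1:
--                     out.append(0)
--                     frst2 = 5
--                 else:
--                     out.append(-last2)
--                 nz2 = 0
--             else:
--                 out.append(0)
--                 if prev2 == 0:
--                     nz2 += 1
--             prev2 = 0
--         else:
--             out.append(sym)
--             last2 = sym
--             prev2 = 1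
--             if nz2 != n - 1:
--                 nz2 = 0
--
--     for bit in seq_bin:
--         if bit == '1':
--             push(state)
--             if frst_v == 1:
--                 state_v = state
--             state = -state
--             prev = bit
--             nbr_zero = 1
--         elif bit == '0':
--             if nbr_zero == n:
--                 push(state_v)
--                 frst_v = 5
--                 state_v = -state_v
--                 nbr_zero = 0
--             else:
--                 push(0)
--                 if prev == '0':
--                     nbr_zero += 1
--             prev = bit
--     return out
-- ===== Notes on version B (the rewrite author's own statement) =====
-- stated objective: alternative
-- what changed: A's two sequential passes (encode to an intermediate list, then rescan it for violation substitution) are fused into one streaming loop that feeds each freshly encoded symbol straight into the second machine, eliminating the intermediate list and the int() re-conversion pass.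
import Mathlib
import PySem

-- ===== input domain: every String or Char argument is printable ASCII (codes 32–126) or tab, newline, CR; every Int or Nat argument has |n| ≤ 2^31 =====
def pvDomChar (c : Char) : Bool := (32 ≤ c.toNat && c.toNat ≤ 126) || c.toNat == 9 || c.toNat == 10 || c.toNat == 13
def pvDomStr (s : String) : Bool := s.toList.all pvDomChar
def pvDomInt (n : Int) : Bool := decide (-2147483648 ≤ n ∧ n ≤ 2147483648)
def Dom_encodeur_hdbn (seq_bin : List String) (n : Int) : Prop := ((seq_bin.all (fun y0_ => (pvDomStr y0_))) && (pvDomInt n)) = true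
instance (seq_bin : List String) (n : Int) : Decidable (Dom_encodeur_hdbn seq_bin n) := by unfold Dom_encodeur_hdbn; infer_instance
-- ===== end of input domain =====

-- B fuses A's two sequential passes into one streaming loop (no intermediate list); objective: alternative decomposition.

-- ===== PORT A =====
-- first pass state: (encoded_signal, state, nbr_zero, frst__V, state_v, prev_bit)
def stepA1 (n : Int) (s : List Int × Int × Int × Int × Int × String) (bit : String) :
    List Int × Int × Int × Int × Int × String :=
  match s with
  | (es, st, nz, fv, sv, pb) =>
    -- `if bit == '1'`
    let (es, st, nz, fv, sv, pb) :=
      if bit = "1" then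
        (es ++ [st], -st, 1, fv, (if fv = 1 then st else sv), bit)
      else (es, st, nz, fv, sv, pb)
    -- `if bit == '0'`
    if bit = "0" then
      if nz = n then (es ++ [sv], st, 0, 5, -sv, bit)
      else (es ++ [0], st, (if pb = "0" then nz + 1 else nz), fv, sv, bit)
    else (es, st, nz, fv, sv, pb)

-- second pass state: (encoded_signal1, last_state, nbr_zero, prev_bit, frst__V)
def stepA2 (n : Int) (s : List Int × Int × Int × Int × Int) (bit : Int) :
    List Int × Int × Int × Int × Int :=
  match s with
  | (out, ls, nz, pb, fv) =>
    -- `if bit == 0`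
    let (out, ls, nz, pb, fv) :=
      if bit = 0 then
        let (out, nz, fv) :=
          if pb = 1 ∧ nz = n - 1 then
            if fv = 1 then (out ++ [bit], 0, 5) else (out ++ [-ls], 0, fv)
          else (out ++ [bit], nz, fv)
        (out, ls, (if pb = 0 then nz + 1 else nz), 0, fv)
      else (out, ls, nz, pb, fv)
    -- `if bit == 1 or bit == -1`
    if bit = 1 ∨ bit = -1 then
      (out ++ [bit], bit, (if nz ≠ n - 1 then 0 else nz), 1, fv)
    else (out, ls, nz, pb, fv)

def encodeur_hdbn (seq_bin : List String) (n : Int) : List Int :=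
  let r1 := seq_bin.foldl (stepA1 n) ([], 1, 0, 1, 0, "1")
  -- `[int(bit) for bit in encoded_signal]` : int() on an int is the identity
  let esInt := r1.1.map (fun b => b)
  (esInt.foldl (stepA2 n) ([], 0, 0, 1, 1)).1

-- ===== PORT B =====
-- `push`: the second machine's step, applied to one fresh symbol; state (out, last2, nz2, prev2, frst2)
def pushB (n : Int) (s : List Int × Int × Int × Int × Int) (sym : Int) :
    List Int × Int × Int × Int × Int :=
  match s with
  | (out, ls, nz, pb, fv) =>
    if sym = 0 then
      if pb = 1 ∧ nz = n - 1 then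
        if fv = 1 then (out ++ [0], ls, 0, 0, 5)
        else (out ++ [-ls], ls, 0, 0, fv)
      else (out ++ [0], ls, (if pb = 0 then nz + 1 else nz), 0, fv)
    else (out ++ [sym], sym, (if nz ≠ n - 1 then 0 else nz), 1, fv)

-- fused loop state: (machine2 state incl. out, state, nbr_zero, frst_v, state_v, prev)
def stepB (n : Int) (s : (List Int × Int × Int × Int × Int) × Int × Int × Int × Int × String)
    (bit : String) : (List Int × Int × Int × Int × Int) × Int × Int × Int × Int × String :=
  match s with
  | (m2, st, nz, fv, sv, pb) =>
    if bit = "1" then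
      (pushB n m2 st, -st, 1, fv, (if fv = 1 then st else sv), bit)
    else if bit = "0" then
      if nz = n then (pushB n m2 sv, st, 0, 5, -sv, bit)
      else (pushB n m2 0, st, (if pb = "0" then nz + 1 else nz), fv, sv, bit)
    else (m2, st, nz, fv, sv, pb)

def encodeur_hdbn_alt (seq_bin : List String) (n : Int) : List Int :=
  (seq_bin.foldl (stepB n) (([], 0, 0, 1, 1), 1, 0, 1, 0, "1")).1.1

-- ===== PRECONDITION & SPEC =====
def Spec_encodeur_hdbn (seq_bin : List String) (n : Int) (out : List Int) : Prop := out = encodeur_hdbn_alt seq_bin n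
instance (seq_bin : List String) (n : Int) (out : List Int) : Decidable (Spec_encodeur_hdbn seq_bin n out) := by unfold Spec_encodeur_hdbn; infer_instance

-- ===== CLAIM (what is proved, stated in full; the proofs are below) =====
def Claim_equal_encodeur_hdbn : Prop := ∀ (seq_bin : List String) (n : Int), Dom_encodeur_hdbn seq_bin n → Spec_encodeur_hdbn seq_bin n (encodeur_hdbn seq_bin n)

-- ===== LEMMAS AND PROOFS =====

-- the symbols pass 1 emits lie in {-1,0,1}; on them push coincides with pass-2's step
theorem pushB_eq_stepA2 (n : Int) (s : List Int × Int × Int × Int × Int) (sym : Int)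
    (h : sym = 0 ∨ sym = 1 ∨ sym = -1) : pushB n s sym = stepA2 n s sym := by
  obtain ⟨out, ls, nz, pb, fv⟩ := s
  rcases h with h | h | h <;> subst h <;> simp [pushB, stepA2] <;> split_ifs <;> simp_all

-- pass 1: the accumulated list is a pure prefix; the rest of the state ignores it
theorem stepA1_acc (n : Int) (es : List Int) (r : Int × Int × Int × Int × String) (bit : String) :
    stepA1 n (es, r) bit = (es ++ (stepA1 n ([], r) bit).1, (stepA1 n ([], r) bit).2) := by
  obtain ⟨st, nz, fv, sv, pb⟩ := r
  simp only [stepA1] <;> split_ifs <;> simp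

theorem foldl_stepA1_acc (n : Int) (t : List String) (es : List Int)
    (r : Int × Int × Int × Int × String) :
    t.foldl (stepA1 n) (es, r)
      = (es ++ (t.foldl (stepA1 n) ([], r)).1, (t.foldl (stepA1 n) ([], r)).2) := by
  induction t generalizing es r with
  | nil => simp
  | cons b t ih =>
      simp only [List.foldl_cons]
      rw [stepA1_acc]
      rw [ih (es ++ (stepA1 n ([], r) b).1), ih (stepA1 n ([], r) b).1]
      simp [List.append_assoc]

-- the fused loop = pass 2 run over pass 1's fresh symbols, given the sign invariants
theorem fused_eq (n : Int) (t : List String) (m2 : List Int × Int × Int × Int × Int)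
    (st nz fv sv : Int) (pb : String)
    (hst : st = 1 ∨ st = -1) (hsv : sv = 0 ∨ sv = 1 ∨ sv = -1) :
    t.foldl (stepB n) (m2, st, nz, fv, sv, pb)
      = ((t.foldl (stepA1 n) ([], st, nz, fv, sv, pb)).1.foldl (stepA2 n) m2,
         (t.foldl (stepA1 n) ([], st, nz, fv, sv, pb)).2) := by
  induction t generalizing m2 st nz fv sv pb with
  | nil => simp
  | cons b t ih =>
      simp only [List.foldl_cons]
      by_cases h1 : b = "1"
      · subst h1
        rw [stepB, stepA1]
        simp only [if_true, String.reduceEq, if_false]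
        rw [ih _ (-st) 1 fv (if fv = 1 then st else sv) "1"
              (by rcases hst with h | h <;> subst h <;> simp)
              (by split_ifs <;> tauto)]
        simp only [List.nil_append]
        rw [foldl_stepA1_acc n t [st]]
        simp [List.foldl_append, pushB_eq_stepA2 n m2 st (by tauto)]
      · by_cases h0 : b = "0"
        · subst h0
          rw [stepB, stepA1]
          simp only [if_true, String.reduceEq, if_false]
          by_cases hnz : nz = n
          · simp only [if_pos hnz]
            rw [ih _ st 0 5 (-sv) "0" hst (by rcases hsv with h | h | h <;> subst h <;> simp)]
            simp only [List.nil_append]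
            rw [foldl_stepA1_acc n t [sv]]
            simp [List.foldl_append, pushB_eq_stepA2 n m2 sv hsv]
          · simp only [if_neg hnz]
            rw [ih _ st (if pb = "0" then nz + 1 else nz) fv sv "0" hst hsv]
            simp only [List.nil_append]
            rw [foldl_stepA1_acc n t [0]]
            simp [List.foldl_append, pushB_eq_stepA2 n m2 0 (by tauto)]
        · rw [stepB, stepA1]
          simp only [if_neg h1, if_neg h0]
          exact ih m2 st nz fv sv pb hst hsv

-- ===== VERDICT (by name: the statement is the Claim_ definition above) =====
theorem encodeur_hdbn_spec : Claim_equal_encodeur_hdbn := by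
  intro seq_bin n _
  unfold Spec_encodeur_hdbn encodeur_hdbn encodeur_hdbn_alt
  rw [fused_eq n seq_bin ([], 0, 0, 1, 1) 1 0 1 0 "1" (by tauto) (by tauto)]
  simp [List.map_id']
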